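-- pv_equiv track=rewrite | github.com/1211105932/codes | codewars/longest_vowel_chain.py | solve
-- ===== SOURCE A (Python) =====
-- def solve(s):
--     count = max_count = 0
--
--     for i in s:
--         if i in set("aeiou"):
--             count += 1
--             max_count = max(max_count, count)
--         else:
--             count = 0
--
--     return max_count
-- ===== SOURCE B (Python) =====
-- def solve(s):
--     best = 0
--     i = 0
--     n = len(s)
--     while i < n:
--         if s[i] in "aeiou":
--             j = i + 1
--             while j < n and s[j] in "aeiou":
--                 j += 1
--             best = max(best, j - i)
--             i = j
--         else:
--             i += 1
--     return best
-- ===== Notes on version B (the rewrite author's own statement) =====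
-- stated objective: alternative
-- what changed: Replaces the running-counter-with-reset single pass by a run-skipping two-pointer scan: find the start of each maximal vowel run, measure it with an inner scan, jump past it, and keep the maximum run length.
import Mathlib
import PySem

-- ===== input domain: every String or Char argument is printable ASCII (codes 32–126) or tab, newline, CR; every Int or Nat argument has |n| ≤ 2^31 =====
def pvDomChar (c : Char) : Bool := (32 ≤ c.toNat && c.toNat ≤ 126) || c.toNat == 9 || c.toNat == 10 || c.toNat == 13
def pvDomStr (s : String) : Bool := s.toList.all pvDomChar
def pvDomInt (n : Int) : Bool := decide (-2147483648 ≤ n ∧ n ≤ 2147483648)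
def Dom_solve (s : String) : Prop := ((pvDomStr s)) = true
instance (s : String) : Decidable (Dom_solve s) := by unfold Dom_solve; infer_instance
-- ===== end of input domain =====

-- B replaces A's running-counter-with-reset pass by a run-skipping two-pointer scan (alternative decomposition, same cost).

-- ===== PORT A =====
-- i in set("aeiou")
def pvVowel (c : Char) : Bool := c == 'a' || c == 'e' || c == 'i' || c == 'o' || c == 'u'

-- the for-loop body over the state (count, max_count)
def pvStepA (st : Int × Int) (c : Char) : Int × Int :=
  if pvVowel c then (st.1 + 1, max st.2 (st.1 + 1)) else (0, st.2)

def solve (s : String) : Int :=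
  (s.toList.foldl pvStepA (0, 0)).2

-- ===== PORT B =====
-- inner while: length of the maximal vowel prefix (j - i after the inner loop)
def pvRunLen : List Char → Int
  | [] => 0
  | c :: cs => if pvVowel c then 1 + pvRunLen cs else 0

-- remainder after skipping the vowel prefix (position j)
def pvDropRun : List Char → List Char
  | [] => []
  | c :: cs => if pvVowel c then pvDropRun cs else c :: cs

theorem pvDropRun_len_le : ∀ (cs : List Char), (pvDropRun cs).length ≤ cs.length := by
  intro cs
  induction cs with
  | nil => simp [pvDropRun]
  | cons c cs ih => simp only [pvDropRun]; split <;> simp only [List.length_cons] <;> omega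

-- outer while loop: find a run start, measure the run, jump past it
def pvGoB : List Char → Int
  | [] => 0
  | c :: cs =>
    if pvVowel c then
      max (1 + pvRunLen cs) (pvGoB (pvDropRun cs))
    else
      pvGoB cs
termination_by cs => cs.length
decreasing_by
  · exact Nat.lt_succ_of_le (pvDropRun_len_le cs)
  · simp

def solve_alt (s : String) : Int :=
  pvGoB s.toList

-- ===== PRECONDITION & SPEC =====
def Spec_solve (s : String) (out : Int) : Prop := out = solve_alt s
instance (s : String) (out : Int) : Decidable (Spec_solve s out) := by unfold Spec_solve; infer_instance

-- ===== CLAIM (what is proved, stated in full; the proofs are below) =====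
def Claim_equal_solve : Prop := ∀ (s : String), Dom_solve s → Spec_solve s (solve s)

-- ===== LEMMAS AND PROOFS =====

theorem pvRunLen_nonneg : ∀ (cs : List Char), 0 ≤ pvRunLen cs := by
  intro cs
  induction cs with
  | nil => simp [pvRunLen]
  | cons c cs ih => simp only [pvRunLen]; split <;> omega

theorem pvGoB_nonneg : ∀ (cs : List Char), 0 ≤ pvGoB cs := by
  intro cs
  induction cs using pvGoB.induct with
  | case1 => simp [pvGoB]
  | case2 c cs h ih =>
      rw [pvGoB]; simp only [h, if_pos]
      have := pvRunLen_nonneg cs; omega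
  | case3 c cs h ih => rw [pvGoB]; simp only [h]; exact ih

-- unfolding B one step at a non-empty list: B's value is max(vowel prefix, rest)
theorem pvGoB_split (cs : List Char) :
    pvGoB cs = max (pvRunLen cs) (pvGoB (pvDropRun cs)) := by
  cases cs with
  | nil => simp [pvGoB, pvRunLen, pvDropRun]
  | cons c cs =>
      by_cases h : pvVowel c = true
      · rw [pvGoB]; simp [pvRunLen, pvDropRun, h]
      · have := pvGoB_nonneg (c :: cs)
        simp only [pvRunLen, pvDropRun, h, if_neg, Bool.false_eq_true, not_false_eq_true]
        omega

-- main invariant: A's fold from state (c, m) with 0 ≤ c ≤ m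
theorem pvFold_eq (cs : List Char) : ∀ (c m : Int), 0 ≤ c → c ≤ m →
    (cs.foldl pvStepA (c, m)).2 = max m (max (c + pvRunLen cs) (pvGoB (pvDropRun cs))) := by
  induction cs with
  | nil =>
      intro c m h0 h1
      simp only [List.foldl, pvRunLen, pvDropRun, pvGoB]
      omega
  | cons x xs ih =>
      intro c m h0 h1
      by_cases h : pvVowel x = true
      · simp [List.foldl, pvStepA, h, pvRunLen, pvDropRun]
        rw [ih (c + 1) (max m (c + 1)) (by omega) (by omega)]
        have := pvRunLen_nonneg xs
        omega
      · simp [List.foldl, pvStepA, h, pvRunLen, pvDropRun]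
        rw [ih 0 m le_rfl (by omega)]
        have hx : pvGoB (x :: xs) = pvGoB xs := by rw [pvGoB]; simp [h]
        have hs := pvGoB_split xs
        have := pvGoB_nonneg (pvDropRun xs)
        have := pvRunLen_nonneg xs
        omega

-- ===== VERDICT (by name: the statement is the Claim_ definition above) =====
theorem solve_spec : Claim_equal_solve := by
  intro s _
  unfold Spec_solve solve solve_alt
  rw [pvFold_eq s.toList 0 0 le_rfl le_rfl, pvGoB_split s.toList]
  have := pvGoB_nonneg (pvDropRun s.toList)
  have := pvRunLen_nonneg s.toList
  omega
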